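-- pv_equiv track=rewrite | github.com/pypi-data/pypi-mirror-364 | packages/hsi-wizard/hsi_wizard-0.1.42-py3-none-any.whl/wizard/_utils/helper.py | find_nex_greater_wave
-- ===== SOURCE A (Python) =====
-- def find_nex_greater_wave(waves, wave_1: int, maximum_deviation: int = 5) -> int:
--     """
--     Find the next greater wave value within a specified deviation.
--
--     This function searches for the smallest wave value greater than or equal to `wave_1`
--     that exists in the `waves` list, within a deviation range up to `maximum_deviation`.
--     If no such wave is found, the function returns -1.
--
--     Parameters
--     ----------
--     waves : list[int]
--         A list of integer wave values to search within.
--     wave_1 : int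
--         The reference wave value to find the next greater wave after.
--     maximum_deviation : int, optional
--         The maximum positive offset from `wave_1` to consider (default is 5).
--
--     Returns
--     -------
--     int
--         The next greater wave value found within the range, or -1 if none exists.
--
--     Raises
--     ------
--     None
--
--     Notes
--     -----
--     The function stops searching once it finds the first match within the allowed range.
--
--     Examples
--     --------
--     >>> find_nex_greater_wave([400, 405, 410, 415], 403)
--     405
--
--     >>> find_nex_greater_wave([400, 405, 410, 415], 416)
--     -1
--     """
--     wave_next = -1
--
--     for n in range(maximum_deviation):
--         wave_n = wave_1 + n
--
--         if wave_n in waves: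
--             wave_next = wave_n
--             break
--
--     return wave_next
-- ===== SOURCE B (Python) =====
-- def find_nex_greater_wave(waves, wave_1: int, maximum_deviation: int = 5) -> int:
--     candidates = [w for w in waves if wave_1 <= w < wave_1 + maximum_deviation]
--     return min(candidates) if candidates else -1
-- ===== Notes on version B (the rewrite author's own statement) =====
-- stated objective: faster
-- what changed: B makes one pass over the data, filtering waves into the half-open window [wave_1, wave_1+maximum_deviation) and returning their minimum (or -1 if none), instead of A's loop over deviation offsets with a list-membership scan per offset.
import Mathlib
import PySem

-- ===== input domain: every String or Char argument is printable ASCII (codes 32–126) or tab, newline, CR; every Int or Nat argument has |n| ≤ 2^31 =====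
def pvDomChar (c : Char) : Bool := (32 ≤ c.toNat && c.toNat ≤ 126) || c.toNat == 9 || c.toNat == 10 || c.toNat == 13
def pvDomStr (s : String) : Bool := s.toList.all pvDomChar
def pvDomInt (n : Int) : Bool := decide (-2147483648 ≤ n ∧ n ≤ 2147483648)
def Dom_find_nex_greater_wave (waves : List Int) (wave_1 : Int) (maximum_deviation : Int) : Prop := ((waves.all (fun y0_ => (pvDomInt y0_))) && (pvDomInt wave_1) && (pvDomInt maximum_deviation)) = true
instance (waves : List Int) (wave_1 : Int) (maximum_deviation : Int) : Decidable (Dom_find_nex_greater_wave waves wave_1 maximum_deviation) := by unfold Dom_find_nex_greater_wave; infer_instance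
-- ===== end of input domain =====

-- B replaces A's offset loop (a list-membership scan per offset) by one filter-then-min pass over the data; objective: faster (O(n) vs O(maximum_deviation*n)).

-- ===== PORT A =====
-- A's `for n in range(maximum_deviation): … if wave_n in waves: …; break`
def fngwLoop (waves : List Int) (wave_1 : Int) : List Int → Int
  | [] => -1
  | n :: rest =>
      let wave_n := wave_1 + n
      if waves.contains wave_n then wave_n else fngwLoop waves wave_1 rest

def find_nex_greater_wave (waves : List Int) (wave_1 : Int) (maximum_deviation : Int) : Int :=
  fngwLoop waves wave_1 (PySem.List.pyRange 0 maximum_deviation 1)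

-- ===== PORT B =====
def find_nex_greater_wave_alt (waves : List Int) (wave_1 : Int) (maximum_deviation : Int) : Int :=
  let candidates := waves.filter (fun w => decide (wave_1 ≤ w) && decide (w < wave_1 + maximum_deviation))
  match PySem.List.min? candidates (fun x => x) with
  | some m => m
  | none => -1

-- ===== PRECONDITION & SPEC =====
def Spec_find_nex_greater_wave (waves : List Int) (wave_1 : Int) (maximum_deviation : Int) (out : Int) : Prop := out = find_nex_greater_wave_alt waves wave_1 maximum_deviation
instance (waves : List Int) (wave_1 : Int) (maximum_deviation : Int) (out : Int) : Decidable (Spec_find_nex_greater_wave waves wave_1 maximum_deviation out) := by unfold Spec_find_nex_greater_wave; infer_instance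

-- ===== CLAIM (what is proved, stated in full; the proofs are below) =====
def Claim_equal_find_nex_greater_wave : Prop := ∀ (waves : List Int) (wave_1 : Int) (maximum_deviation : Int), Dom_find_nex_greater_wave waves wave_1 maximum_deviation → Spec_find_nex_greater_wave waves wave_1 maximum_deviation (find_nex_greater_wave waves wave_1 maximum_deviation)

-- ===== LEMMAS AND PROOFS =====

-- The A-side loop over offsets [a, b) equals min-of-filter over the window [w1+a, w1+b).
lemma fngwLoop_eq_min (waves : List Int) (w1 : Int) :
    ∀ (k : Nat) (a b : Int), (b - a).toNat = k →
      fngwLoop waves w1 (PySem.List.pyRange a b 1) =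
        (match PySem.List.min? (waves.filter (fun w => decide (w1 + a ≤ w) && decide (w < w1 + b))) (fun x => x) with
         | some m => m
         | none => -1) := by
  intro k
  induction k with
  | zero =>
      intro a b hk
      have hba : b ≤ a := by omega
      rw [PySem.List.pyRange_one_eq_nil hba]
      have hf : waves.filter (fun w => decide (w1 + a ≤ w) && decide (w < w1 + b)) = [] := by
        apply List.filter_eq_nil_iff.mpr
        intro w _
        simp only [Bool.and_eq_true, decide_eq_true_eq, not_and]
        omega
      rw [hf]
      rfl
  | succ k ih =>
      intro a b hk
      have hab : a < b := by omega
      rw [PySem.List.pyRange_one_cons hab]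
      show (if waves.contains (w1 + a) then w1 + a else fngwLoop waves w1 (PySem.List.pyRange (a+1) b 1)) = _
      by_cases hmem : (w1 + a) ∈ waves
      · have hc : waves.contains (w1 + a) = true := List.elem_eq_true_of_mem hmem
        rw [if_pos hc]
        have hinF : (w1 + a) ∈ waves.filter (fun w => decide (w1 + a ≤ w) && decide (w < w1 + b)) := by
          apply List.mem_filter.mpr
          refine ⟨hmem, ?_⟩
          simp only [Bool.and_eq_true, decide_eq_true_eq]
          omega
        cases hmin : PySem.List.min? (waves.filter (fun w => decide (w1 + a ≤ w) && decide (w < w1 + b))) (fun x => x) with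
        | none =>
            rw [(PySem.List.min?_eq_none_iff _ _).mp hmin] at hinF
            simp at hinF
        | some m =>
            show w1 + a = m
            have hmF := PySem.List.min?_mem hmin
            have hle : m ≤ w1 + a := PySem.List.min?_isMin hmin _ hinF
            have hge : w1 + a ≤ m := by
              have := (List.mem_filter.mp hmF).2
              simp only [Bool.and_eq_true, decide_eq_true_eq] at this
              omega
            omega
      · rw [if_neg (by simp only [List.contains_eq_mem, decide_eq_true_eq]; exact hmem)]
        have hfe : waves.filter (fun w => decide (w1 + a ≤ w) && decide (w < w1 + b)) =
            waves.filter (fun w => decide (w1 + (a+1) ≤ w) && decide (w < w1 + b)) := by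
          apply List.filter_congr
          intro w hw
          have hne : w ≠ w1 + a := fun h => hmem (h ▸ hw)
          congr 1
          rw [decide_eq_decide]
          omega
        rw [hfe, ih (a+1) b (by omega)]

-- ===== VERDICT (by name: the statement is the Claim_ definition above) =====
theorem find_nex_greater_wave_spec : Claim_equal_find_nex_greater_wave := by
  intro waves w1 md _
  show find_nex_greater_wave waves w1 md = find_nex_greater_wave_alt waves w1 md
  unfold find_nex_greater_wave find_nex_greater_wave_alt
  rw [fngwLoop_eq_min waves w1 ((md - 0).toNat) 0 md rfl]
  simp only [add_zero]
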